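-- pv_equiv track=rewrite | github.com/Futarimiti/advent-of-code2023 | 3-gear-ratios/main.py | numbers_in_es
-- ===== SOURCE A (Python) =====
-- from collections.abc import Iterable
-- from typing import Dict, List, Tuple, TypeVar
-- from itertools import dropwhile, takewhile
--
-- def overlapping(range1: Tuple[int, int], range2: Tuple[int, int]) -> bool:
--     match range1, range2:
--         case (a, b), (c, d):
--             return a <= d and c <= b
--
-- def numbers_in_es(e: Iterable[Tuple[int, str]],
--                   ranges: Iterable[Tuple[int, int]]) -> Iterable[int]:
--     enum = dropwhile(lambda e_: not e_[1].isnumeric(), e)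
--     match list(enum):
--         case []: return []
--         case es:
--             num_e = list(takewhile(lambda e: e[1].isnumeric(), es))
--             start_idx = num_e[0][0]
--             end_idx = num_e[-1][0]
--             num_range = (start_idx, end_idx)
--             next_es = dropwhile(lambda e: e[1].isnumeric(), es)
--             if any(map(lambda r: overlapping(num_range, r), ranges)):
--                 num = int(''.join(map(lambda e: e[1], num_e)))
--                 return [num, *numbers_in_es(next_es, ranges)]
--             else:
--                 return numbers_in_es(next_es, ranges)
-- ===== SOURCE B (Python) =====
-- def numbers_in_es(e, ranges):
--     # Alternative algorithm: sort ranges by start once, keep a prefix-maximum of the ends, answer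
--     # each digit-run's overlap query with one binary search instead of scanning
--     # every range; the runs themselves are found in a single index-based pass.
--     rs = sorted(ranges, key=lambda r: r[0])
--     starts = []
--     maxends = []
--     m = None
--     for c, d in rs:
--         m = d if m is None else max(m, d)
--         starts.append(c)
--         maxends.append(m)
--
--     def hit(s, t):
--         # hand-written bisect_right(starts, t)
--         lo, hi = 0, len(starts)
--         while lo < hi:
--             mid = (lo + hi) // 2
--             if t < starts[mid]:
--                 hi = mid
--             else:
--                 lo = mid + 1
--         return lo > 0 and maxends[lo - 1] >= s
--
--     items = list(e)
--     n = len(items)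
--     out = []
--     i = 0
--     while i < n:
--         if items[i][1].isnumeric():
--             j = i
--             while j < n and items[j][1].isnumeric():
--                 j += 1
--             if hit(items[i][0], items[j - 1][0]):
--                 out.append(int(''.join(items[k][1] for k in range(i, j))))
--             i = j
--         else:
--             i += 1
--     return out
-- ===== Notes on version B (the rewrite author's own statement) =====
-- stated objective: alternative
-- what changed: B replaces A's recursive dropwhile/takewhile re-scans and its per-run linear scan over ALL ranges by a single iterative pass over e plus a range index built once (ranges sorted by start with a prefix-maximum of ends), so each digit-run's overlap test is one binary search; asymptotically better in runs*ranges but not measurably faster on the generated inputs.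
import Mathlib
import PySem

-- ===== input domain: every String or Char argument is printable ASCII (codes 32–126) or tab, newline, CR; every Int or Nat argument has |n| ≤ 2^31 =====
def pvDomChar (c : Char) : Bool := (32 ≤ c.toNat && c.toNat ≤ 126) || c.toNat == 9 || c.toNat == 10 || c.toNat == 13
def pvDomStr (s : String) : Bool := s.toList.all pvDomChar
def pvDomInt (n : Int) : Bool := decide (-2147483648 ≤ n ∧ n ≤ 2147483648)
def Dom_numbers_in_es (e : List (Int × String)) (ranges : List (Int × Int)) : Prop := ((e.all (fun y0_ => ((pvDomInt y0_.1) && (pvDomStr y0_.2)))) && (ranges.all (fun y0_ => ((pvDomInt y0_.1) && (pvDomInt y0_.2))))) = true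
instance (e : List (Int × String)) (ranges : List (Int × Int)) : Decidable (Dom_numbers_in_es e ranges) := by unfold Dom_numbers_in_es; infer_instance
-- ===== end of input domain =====

-- B builds a sorted range index (starts + prefix-max of ends) queried by binary search,
-- and finds the digit-runs in one iterative pass, instead of A's recursive
-- dropwhile/takewhile with a linear scan of all ranges per run (objective: alternative).
-- Python str.isnumeric is ported as PySem.Str.strIsdigit — exact on the ASCII domain.

-- ===== PORT A =====
def pvOverlapping (r1 r2 : Int × Int) : Bool :=
  decide (r1.1 ≤ r2.2) && decide (r2.1 ≤ r1.2)

theorem pv_dropWhile_head_false {α : Type} (p : α → Bool) (l : List α) (a : α) (t : List α)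
    (h : l.dropWhile p = a :: t) : p a = false := by
  induction l with
  | nil => simp at h
  | cons x xs ih =>
    rw [List.dropWhile_cons] at h
    by_cases hx : p x = true
    · rw [if_pos hx] at h; exact ih h
    · rw [if_neg hx] at h
      cases h
      simpa using hx

-- used only by `decreasing_by` of the port below
theorem pv_dec (e : List (Int × String)) (a : Int × String) (t : List (Int × String))
    (h : e.dropWhile (fun e_ => !(PySem.Str.strIsdigit e_.2)) = a :: t) :
    (List.dropWhile (fun p => PySem.Str.strIsdigit p.2)
      (e.dropWhile (fun e_ => !(PySem.Str.strIsdigit e_.2)))).length < e.length := by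
  have hle := List.length_dropWhile_le (fun e_ => !(PySem.Str.strIsdigit e_.2)) e
  rw [h] at hle ⊢
  have hd : PySem.Str.strIsdigit a.2 = true := by
    have := pv_dropWhile_head_false _ e a t h
    simpa using this
  rw [List.dropWhile_cons, hd]
  have ht := List.length_dropWhile_le (fun p => PySem.Str.strIsdigit p.2) t
  simp only [List.length_cons] at hle ⊢
  simp only [if_pos]
  omega

def numbers_in_es (e : List (Int × String)) (ranges : List (Int × Int)) : List Int :=
  -- enum = dropwhile(not isnumeric, e); match on its list
  match h : e.dropWhile (fun e_ => !(PySem.Str.strIsdigit e_.2)) with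
  | [] => []
  | _ :: _ =>
    let es := e.dropWhile (fun e_ => !(PySem.Str.strIsdigit e_.2))
    let num_e := es.takeWhile (fun p => PySem.Str.strIsdigit p.2)
    let start_idx := ((PySem.List.pyGet? num_e 0).getD (0, "")).1   -- num_e[0] (never out of range here)
    let end_idx := ((PySem.List.pyGet? num_e (-1)).getD (0, "")).1  -- num_e[-1]
    let next_es := es.dropWhile (fun p => PySem.Str.strIsdigit p.2)
    if ranges.any (fun r => pvOverlapping (start_idx, end_idx) r) then
      -- int(''.join(...)); the join is a nonempty digit string here, so int() never raises
      ((PySem.Int.ofStr? (PySem.Str.join "" (num_e.map Prod.snd))).getD 0)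
        :: numbers_in_es next_es ranges
    else
      numbers_in_es next_es ranges
termination_by e.length
decreasing_by
  all_goals exact pv_dec e _ _ h

-- ===== PORT B =====
-- the hand-written bisect_right loop in Source B is step-for-step PySem.List.bisectRightLoop,
-- so it is ported as PySem.List.bisectRight
def pvHit (starts maxends : List Int) (s t : Int) : Bool :=
  decide (0 < PySem.List.bisectRight starts t) &&
    decide (s ≤ (PySem.List.pyGet? maxends (Int.ofNat (PySem.List.bisectRight starts t) - 1)).getD 0)

-- one step of the for-loop building (starts, maxends, m)
-- `m = d if m is None else max(m, d)`
def pvMx (mo : Option Int) (d : Int) : Int := match mo with | none => d | some m => max m d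

def pvBuildStep (st : List Int × List Int × Option Int) (r : Int × Int) :
    List Int × List Int × Option Int :=
  let m' := pvMx st.2.2 r.2
  (st.1 ++ [r.1], st.2.1 ++ [m'], some m')

-- the inner `while j < n and items[j][1].isnumeric(): j += 1` counter
def pvCountDigits : List (Int × String) → Nat
  | [] => 0
  | p :: rest => if PySem.Str.strIsdigit p.2 then pvCountDigits rest + 1 else 0

theorem pvCountDigits_pos (p : Int × String) (rest : List (Int × String))
    (h : PySem.Str.strIsdigit p.2 = true) : 0 < pvCountDigits (p :: rest) := by
  have h' : PySem.Chars.strIsdigit p.2.toList = true := h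
  simp [pvCountDigits, h']

-- the outer `while i < n` loop, walking the suffix of items not yet consumed
def pvLoop (hit : Int → Int → Bool) : List (Int × String) → List Int
  | [] => []
  | p :: rest =>
    if PySem.Str.strIsdigit p.2 then
      let l := p :: rest
      let j := pvCountDigits l
      let run := l.take j
      let s := ((PySem.List.pyGet? run 0).getD (0, "")).1   -- items[i][0]
      let t := ((PySem.List.pyGet? run (-1)).getD (0, "")).1 -- items[j-1][0]
      let res := pvLoop hit (l.drop j)
      if hit s t then
        ((PySem.Int.ofStr? (PySem.Str.join "" (run.map Prod.snd))).getD 0) :: res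
      else res
    else
      pvLoop hit rest
termination_by l => l.length
decreasing_by
  · rename_i h
    have := pvCountDigits_pos p rest h
    simp [List.length_drop]
    omega
  · simp

def numbers_in_es_alt (e : List (Int × String)) (ranges : List (Int × Int)) : List Int :=
  let rs := PySem.List.sorted ranges (fun r => r.1) false
  let built := rs.foldl pvBuildStep ([], [], none)
  pvLoop (pvHit built.1 built.2.1) e

-- ===== PRECONDITION & SPEC =====
def Spec_numbers_in_es (e : List (Int × String)) (ranges : List (Int × Int)) (out : List Int) : Prop := out = numbers_in_es_alt e ranges
instance (e : List (Int × String)) (ranges : List (Int × Int)) (out : List Int) : Decidable (Spec_numbers_in_es e ranges out) := by unfold Spec_numbers_in_es; infer_instance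

-- ===== CLAIM (what is proved, stated in full; the proofs are below) =====
def Claim_equal_numbers_in_es : Prop := ∀ (e : List (Int × String)) (ranges : List (Int × Int)), Dom_numbers_in_es e ranges → Spec_numbers_in_es e ranges (numbers_in_es e ranges)

-- ===== LEMMAS AND PROOFS =====

-- prefix maxima of the ends, as produced by the build loop
def pvMaxScan : Option Int → List (Int × Int) → List Int
  | _, [] => []
  | mo, r :: t => pvMx mo r.2 :: pvMaxScan (some (pvMx mo r.2)) t

theorem pvMx_none (d : Int) : pvMx none d = d := rfl
theorem pvMx_some (m d : Int) : pvMx (some m) d = max m d := rfl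

theorem pvMaxScan_length (mo : Option Int) (rs : List (Int × Int)) :
    (pvMaxScan mo rs).length = rs.length := by
  induction rs generalizing mo with
  | nil => rfl
  | cons r t ih => simp [pvMaxScan, ih]

theorem pvBuild_eq (rs : List (Int × Int)) (S M : List Int) (mo : Option Int) :
    (rs.foldl pvBuildStep (S, M, mo)).1 = S ++ rs.map (fun r => r.1) ∧
    (rs.foldl pvBuildStep (S, M, mo)).2.1 = M ++ pvMaxScan mo rs := by
  induction rs generalizing S M mo with
  | nil => simp [pvMaxScan]
  | cons r t ih =>
    simp only [List.foldl_cons, pvBuildStep, pvMaxScan]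
    have := ih (S ++ [r.1]) (M ++ [pvMx mo r.2]) (some (pvMx mo r.2))
    simpa using this

theorem pvMaxScan_ge_init (rs : List (Int × Int)) (m : Int) (k : Nat)
    (hk : k < (pvMaxScan (some m) rs).length) : m ≤ (pvMaxScan (some m) rs)[k] := by
  induction rs generalizing m k with
  | nil => simp [pvMaxScan] at hk
  | cons r t ih =>
    cases k with
    | zero => simp [pvMaxScan, pvMx_some]
    | succ k =>
      simp only [pvMaxScan, List.getElem_cons_succ]
      have hk' : k < (pvMaxScan (some (pvMx (some m) r.2)) t).length := by
        simpa [pvMaxScan] using hk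
      exact le_trans (by simp [pvMx_some]) (ih (pvMx (some m) r.2) k hk')

theorem pvMaxScan_dominates (rs : List (Int × Int)) (mo : Option Int) (j k : Nat)
    (hjk : j ≤ k) (hk : k < (pvMaxScan mo rs).length) (hj : j < rs.length) :
    (rs[j]).2 ≤ (pvMaxScan mo rs)[k] := by
  induction rs generalizing mo j k with
  | nil => simp at hj
  | cons r t ih =>
    cases j with
    | zero =>
      cases k with
      | zero =>
        cases mo <;> simp [pvMaxScan, pvMx_none, pvMx_some]
      | succ k =>
        simp only [List.getElem_cons_zero, pvMaxScan, List.getElem_cons_succ]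
        have hk' : k < (pvMaxScan (some (pvMx mo r.2)) t).length := by
          simpa [pvMaxScan] using hk
        refine le_trans ?_ (pvMaxScan_ge_init t (pvMx mo r.2) k hk')
        cases mo <;> simp [pvMx_none, pvMx_some]
    | succ j =>
      cases k with
      | zero => omega
      | succ k =>
        simp only [List.getElem_cons_succ, pvMaxScan]
        have hk' : k < (pvMaxScan (some (pvMx mo r.2)) t).length := by
          simpa [pvMaxScan] using hk
        exact ih _ j k (by omega) hk' (by simpa using hj)

theorem pvMaxScan_attained (rs : List (Int × Int)) (mo : Option Int) (k : Nat)
    (hk : k < (pvMaxScan mo rs).length) :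
    (∃ j, ∃ hj : j < rs.length, j ≤ k ∧ (pvMaxScan mo rs)[k] = (rs[j]).2) ∨
    (∃ m, mo = some m ∧ (pvMaxScan mo rs)[k] = m) := by
  induction rs generalizing mo k with
  | nil => simp [pvMaxScan] at hk
  | cons r t ih =>
    cases k with
    | zero =>
      cases mo with
      | none => exact Or.inl ⟨0, by simp, by simp, by simp [pvMaxScan, pvMx_none]⟩
      | some m =>
        rcases max_choice m r.2 with h | h
        · exact Or.inr ⟨m, rfl, by simp [pvMaxScan, pvMx_some, h]⟩
        · exact Or.inl ⟨0, by simp, by simp, by simp [pvMaxScan, pvMx_some, h]⟩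
    | succ k =>
      have hk' : k < (pvMaxScan (some (pvMx mo r.2)) t).length := by
        simpa [pvMaxScan] using hk
      have heq : (pvMaxScan mo (r :: t))[k + 1]'hk =
          (pvMaxScan (some (pvMx mo r.2)) t)[k]'hk' := by
        simp [pvMaxScan]
      rcases ih _ k hk' with ⟨j, hj, hjk, hval⟩ | ⟨m, hm, hval⟩
      · exact Or.inl ⟨j + 1, by simpa using hj, by omega, by rw [heq, hval]; simp⟩
      · -- the carried max is either the initial mo (if some) or some earlier end
        cases mo with
        | none =>
          have hm' : r.2 = m := by simpa [pvMx_none] using hm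
          exact Or.inl ⟨0, by simp, by omega, by rw [heq, hval, ← hm']; simp⟩
        | some m0 =>
          have hm' : max m0 r.2 = m := by simpa [pvMx_some] using hm
          rcases max_choice m0 r.2 with h | h
          · exact Or.inr ⟨m0, rfl, by rw [heq, hval, ← hm', h]⟩
          · exact Or.inl ⟨0, by simp, by omega, by rw [heq, hval, ← hm', h]; simp⟩

-- the binary-search query equals the linear any-scan
theorem pvHit_eq_any (ranges : List (Int × Int)) (s t : Int) :
    pvHit (((PySem.List.sorted ranges (fun r => r.1) false).foldl pvBuildStep ([], [], none)).1)
          (((PySem.List.sorted ranges (fun r => r.1) false).foldl pvBuildStep ([], [], none)).2.1)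
          s t
      = ranges.any (fun r => pvOverlapping (s, t) r) := by
  set rs := PySem.List.sorted ranges (fun r => r.1) false with hrs
  obtain ⟨h1, h2⟩ := pvBuild_eq rs [] [] none
  rw [Bool.eq_iff_iff]
  unfold pvHit
  rw [h1, h2]
  simp only [List.nil_append]
  have hlenM : (pvMaxScan none rs).length = rs.length := pvMaxScan_length none rs
  have hpair : (rs.map (fun r => r.1)).Pairwise (· ≤ ·) :=
    PySem.List.sorted_map_key_pairwise ranges (fun r => r.1)
  obtain ⟨hble, hlt, hgt⟩ := PySem.List.bisectRight_spec (rs.map (fun r => r.1)) t hpair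
  simp only [List.length_map] at hble
  obtain ⟨lo, hlo⟩ : ∃ lo, PySem.List.bisectRight (List.map (fun r => r.1) rs) t = lo := ⟨_, rfl⟩
  rw [hlo] at hble hlt hgt
  simp only [hlo]
  constructor
  · intro h
    simp only [Bool.and_eq_true, decide_eq_true_eq] at h
    obtain ⟨hpos, hs⟩ := h
    have hidx : (Int.ofNat lo - 1) = ((lo - 1 : Nat) : Int) := by
      cases lo with
      | zero => exact absurd hpos (lt_irrefl 0)
      | succ k => simp
    rw [hidx, PySem.List.pyGet?_natCast] at hs
    have hlt1 : lo - 1 < (pvMaxScan none rs).length := by omega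
    rw [List.getElem?_eq_getElem hlt1, Option.getD_some] at hs
    rcases pvMaxScan_attained rs none (lo - 1) hlt1 with ⟨j, hj, hjk, hval⟩ | ⟨m, hm, _⟩
    · rw [List.any_eq_true]
      refine ⟨rs[j], ?_, ?_⟩
      · exact (PySem.List.mem_sorted ranges (fun r => r.1) false _).mp (List.getElem_mem hj)
      · have hstart : rs[j].1 ≤ t := by
          have := hlt j (by simpa using hj) (by omega)
          simpa using this
        rw [hval] at hs
        simp only [pvOverlapping, Bool.and_eq_true, decide_eq_true_eq]
        exact ⟨hs, hstart⟩
    · cases hm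
  · intro h
    rw [List.any_eq_true] at h
    obtain ⟨r, hr, hov⟩ := h
    rw [← PySem.List.mem_sorted ranges (fun r => r.1) false] at hr
    obtain ⟨j, hjlen, hjr⟩ := List.mem_iff_getElem.mp hr
    simp only [pvOverlapping, Bool.and_eq_true, decide_eq_true_eq] at hov
    have hjlt : j < lo := by
      by_contra hc
      have := hgt j (by rw [List.length_map]; exact hjlen) (by omega)
      rw [List.getElem_map] at this
      rw [hjr] at this
      omega
    have hpos : 0 < lo := by omega
    have hdom := pvMaxScan_dominates rs none j (lo - 1) (by omega) (by omega) hjlen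
    simp only [Bool.and_eq_true, decide_eq_true_eq]
    refine ⟨by simpa using hpos, ?_⟩
    have hidx : (Int.ofNat lo - 1) = ((lo - 1 : Nat) : Int) := by
      cases lo with
      | zero => exact absurd hpos (lt_irrefl 0)
      | succ k => simp
    rw [hidx, PySem.List.pyGet?_natCast,
      List.getElem?_eq_getElem (by omega : lo - 1 < (pvMaxScan none rs).length), Option.getD_some]
    rw [hjr] at hdom
    omega

-- pvCountDigits counts the digit prefix
theorem pvCountDigits_eq (l : List (Int × String)) :
    pvCountDigits l = (l.takeWhile (fun p => PySem.Str.strIsdigit p.2)).length := by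
  induction l with
  | nil => rfl
  | cons p rest ih =>
    by_cases h : PySem.Chars.strIsdigit p.2.toList = true <;>
      simp [pvCountDigits, h, ih]

theorem take_takeWhile_length {α : Type} (p : α → Bool) (l : List α) :
    l.take (l.takeWhile p).length = l.takeWhile p := by
  induction l with
  | nil => rfl
  | cons a t ih =>
    by_cases h : p a = true <;> simp [h, ih]

theorem drop_takeWhile_length {α : Type} (p : α → Bool) (l : List α) :
    l.drop (l.takeWhile p).length = l.dropWhile p := by
  induction l with
  | nil => rfl
  | cons a t ih =>
    by_cases h : p a = true <;> simp [h, ih]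

-- step equations for the two loops
theorem pvA_nil (ranges : List (Int × Int)) : numbers_in_es [] ranges = [] := by
  rw [numbers_in_es]
  rfl

theorem pvA_skip (p : Int × String) (rest : List (Int × String)) (ranges : List (Int × Int))
    (hd : PySem.Str.strIsdigit p.2 = false) :
    numbers_in_es (p :: rest) ranges = numbers_in_es rest ranges := by
  have hd' : PySem.Chars.strIsdigit p.2.toList = false := hd
  have key : List.dropWhile (fun e_ => !PySem.Str.strIsdigit e_.2) (p :: rest)
      = List.dropWhile (fun e_ => !PySem.Str.strIsdigit e_.2) rest := by
    simp [hd']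
  conv_lhs => rw [numbers_in_es]
  conv_rhs => rw [numbers_in_es]
  rw [key]

theorem pvA_digit (p : Int × String) (rest : List (Int × String)) (ranges : List (Int × Int))
    (hd : PySem.Str.strIsdigit p.2 = true) :
    numbers_in_es (p :: rest) ranges =
      (if ranges.any (fun r => pvOverlapping
            ((((PySem.List.pyGet? ((p :: rest).takeWhile (fun x => PySem.Str.strIsdigit x.2)) 0).getD (0, "")).1),
             (((PySem.List.pyGet? ((p :: rest).takeWhile (fun x => PySem.Str.strIsdigit x.2)) (-1)).getD (0, "")).1)) r)
       then ((PySem.Int.ofStr? (PySem.Str.join ""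
              (((p :: rest).takeWhile (fun x => PySem.Str.strIsdigit x.2)).map Prod.snd))).getD 0)
              :: numbers_in_es ((p :: rest).dropWhile (fun x => PySem.Str.strIsdigit x.2)) ranges
       else numbers_in_es ((p :: rest).dropWhile (fun x => PySem.Str.strIsdigit x.2)) ranges) := by
  have hd' : PySem.Chars.strIsdigit p.2.toList = true := hd
  have key : List.dropWhile (fun e_ => !PySem.Str.strIsdigit e_.2) (p :: rest) = p :: rest := by
    simp [hd']
  conv_lhs => rw [numbers_in_es]
  rw [key]

theorem pvLoop_nil (hit : Int → Int → Bool) : pvLoop hit [] = [] := by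
  rw [pvLoop]

theorem pvLoop_skip (hit : Int → Int → Bool) (p : Int × String) (rest : List (Int × String))
    (hd : PySem.Str.strIsdigit p.2 = false) :
    pvLoop hit (p :: rest) = pvLoop hit rest := by
  rw [pvLoop]
  have hd' : PySem.Chars.strIsdigit p.2.toList = false := hd
  rw [if_neg (by simp [hd'])]

theorem pvLoop_digit (hit : Int → Int → Bool) (p : Int × String) (rest : List (Int × String))
    (hd : PySem.Str.strIsdigit p.2 = true) :
    pvLoop hit (p :: rest) =
      (if hit (((PySem.List.pyGet? ((p :: rest).takeWhile (fun x => PySem.Str.strIsdigit x.2)) 0).getD (0, "")).1)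
              (((PySem.List.pyGet? ((p :: rest).takeWhile (fun x => PySem.Str.strIsdigit x.2)) (-1)).getD (0, "")).1)
       then ((PySem.Int.ofStr? (PySem.Str.join ""
              (((p :: rest).takeWhile (fun x => PySem.Str.strIsdigit x.2)).map Prod.snd))).getD 0)
              :: pvLoop hit ((p :: rest).dropWhile (fun x => PySem.Str.strIsdigit x.2))
       else pvLoop hit ((p :: rest).dropWhile (fun x => PySem.Str.strIsdigit x.2))) := by
  rw [pvLoop]
  rw [if_pos hd]
  simp only [pvCountDigits_eq, take_takeWhile_length, drop_takeWhile_length]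

-- A equals the single-pass loop driven by the linear any-scan test
theorem numbers_in_es_eq_pvLoop (e : List (Int × String)) (ranges : List (Int × Int)) :
    numbers_in_es e ranges
      = pvLoop (fun s t => ranges.any (fun r => pvOverlapping (s, t) r)) e := by
  suffices H : ∀ (n : Nat) (e : List (Int × String)), e.length ≤ n →
      numbers_in_es e ranges
        = pvLoop (fun s t => ranges.any (fun r => pvOverlapping (s, t) r)) e from
    H e.length e le_rfl
  intro n
  induction n with
  | zero =>
    intro e he
    have : e = [] := by cases e <;> simp_all
    subst this
    rw [pvA_nil, pvLoop_nil]
  | succ n ihn =>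
    intro e he
    match e with
    | [] => rw [pvA_nil, pvLoop_nil]
    | p :: rest =>
      by_cases hd : PySem.Str.strIsdigit p.2 = true
      · rw [pvA_digit p rest ranges hd, pvLoop_digit _ p rest hd]
        have hdrop : ((p :: rest).dropWhile (fun x => PySem.Str.strIsdigit x.2)).length ≤ n := by
          have : (p :: rest).dropWhile (fun x => PySem.Str.strIsdigit x.2)
              = rest.dropWhile (fun x => PySem.Str.strIsdigit x.2) := by
            have hd2 : PySem.Chars.strIsdigit p.2.toList = true := hd
            simp [hd2]
          rw [this]
          have := List.length_dropWhile_le (fun x : Int × String => PySem.Str.strIsdigit x.2) rest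
          simp only [List.length_cons] at he
          omega
        rw [ihn _ hdrop]
      · have hd' : PySem.Str.strIsdigit p.2 = false := by simpa using hd
        rw [pvA_skip p rest ranges hd', pvLoop_skip _ p rest hd']
        exact ihn rest (by simpa using he)

theorem pvLoop_congr (h1 h2 : Int → Int → Bool) (hh : ∀ s t, h1 s t = h2 s t)
    (e : List (Int × String)) : pvLoop h1 e = pvLoop h2 e := by
  have : h1 = h2 := funext fun s => funext fun t => hh s t
  rw [this]

-- ===== VERDICT (by name: the statement is the Claim_ definition above) =====
theorem numbers_in_es_spec : Claim_equal_numbers_in_es := by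
  intro e ranges _hdom
  unfold Spec_numbers_in_es numbers_in_es_alt
  rw [numbers_in_es_eq_pvLoop]
  exact pvLoop_congr _ _ (fun s t => (pvHit_eq_any ranges s t).symm) e
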